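-- pv_equiv track=rewrite | github.com/nonameP765/Alpha_Othello | AllWorld/gameDataSave.py | y_categorical
-- ===== SOURCE A (Python) =====
-- def y_categorical(p0):
--     tmp = list()
--     for i in range(8):
--         btmp = list()
--         for j in range(8):
--             if p0 == [j, i]:
--                 btmp.append(1)
--             else:
--                 btmp.append(0)
--         tmp.append(btmp)
--
--     rtmp = list()
--     for i in range(8):
--         for j in range(8):
--             rtmp.append(tmp[i][j])
--
--     return rtmp
-- ===== SOURCE B (Python) =====
-- def y_categorical(p0):
--     result = [0] * 64
--     if len(p0) == 2 and 0 <= p0[0] < 8 and 0 <= p0[1] < 8: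
--         result[8 * p0[1] + p0[0]] = 1
--     return result
-- ===== Notes on version B (the rewrite author's own statement) =====
-- stated objective: simpler
-- what changed: Replaces the nested 8x8 grid construction plus a second flattening double loop (128 per-cell comparisons of p0 against [j,i]) by allocating a flat [0]*64 and setting the single one-hot index 8*p0[1]+p0[0] when p0 is a length-2 in-range coordinate.
import Mathlib
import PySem

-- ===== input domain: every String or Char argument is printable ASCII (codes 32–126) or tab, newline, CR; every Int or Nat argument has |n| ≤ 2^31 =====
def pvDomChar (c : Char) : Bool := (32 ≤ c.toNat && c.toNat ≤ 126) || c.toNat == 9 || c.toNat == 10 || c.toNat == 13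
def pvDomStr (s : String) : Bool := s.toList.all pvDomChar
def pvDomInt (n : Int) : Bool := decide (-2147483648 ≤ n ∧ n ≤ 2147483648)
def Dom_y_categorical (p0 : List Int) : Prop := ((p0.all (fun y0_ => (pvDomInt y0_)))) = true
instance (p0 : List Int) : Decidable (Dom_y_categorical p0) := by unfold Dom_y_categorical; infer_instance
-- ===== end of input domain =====

-- B replaces A's nested 8x8 grid build plus flattening pass by a flat [0]*64 with one
-- in-range one-hot assignment (objective: simpler).

-- ===== PORT A =====
def y_categorical (p0 : List Int) : List Int :=
  let tmp : List (List Int) :=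
    (PySem.List.pyRange 0 8 1).foldl (fun tmp i =>
      let btmp : List Int :=
        (PySem.List.pyRange 0 8 1).foldl (fun btmp j =>
          if p0 = [j, i] then btmp ++ [1] else btmp ++ [0]) []
      tmp ++ [btmp]) []
  (PySem.List.pyRange 0 8 1).foldl (fun rtmp i =>
    (PySem.List.pyRange 0 8 1).foldl (fun rtmp j =>
      rtmp ++ [(PySem.List.pyGet? ((PySem.List.pyGet? tmp i).getD []) j).getD 0]) rtmp) []

-- ===== PORT B =====
def y_categorical_alt (p0 : List Int) : List Int :=
  let result : List Int := List.replicate 64 0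
  match p0 with
  | [a, b] =>
      if 0 ≤ a ∧ a < 8 ∧ 0 ≤ b ∧ b < 8 then result.set (8 * b + a).toNat 1 else result
  | _ => result

-- ===== PRECONDITION & SPEC =====
def Spec_y_categorical (p0 : List Int) (out : List Int) : Prop := out = y_categorical_alt p0
instance (p0 : List Int) (out : List Int) : Decidable (Spec_y_categorical p0 out) := by unfold Spec_y_categorical; infer_instance

-- ===== CLAIM (what is proved, stated in full; the proofs are below) =====
def Claim_equal_y_categorical : Prop := ∀ (p0 : List Int), Dom_y_categorical p0 → Spec_y_categorical p0 (y_categorical p0)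

-- ===== LEMMAS AND PROOFS =====

-- A returns all zeros whenever p0 is not a two-element list.
theorem y_categorical_not_pair (p0 : List Int) (h : ∀ a b : Int, p0 ≠ [a, b]) :
    y_categorical p0 = List.replicate 64 0 := by
  unfold y_categorical
  simp only [show (PySem.List.pyRange 0 8 1) = [0,1,2,3,4,5,6,7] from by decide]
  simp only [show ∀ a b : Int, (p0 = [a,b]) = False from fun a b => eq_false (h a b), if_false]
  decide

-- ===== VERDICT (by name: the statement is the Claim_ definition above) =====
theorem y_categorical_spec : Claim_equal_y_categorical := by
  intro p0 _
  unfold Spec_y_categorical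
  match p0 with
  | [] => rw [y_categorical_not_pair [] (by simp)]; rfl
  | [a] => rw [y_categorical_not_pair [a] (by simp)]; rfl
  | a :: b :: c :: l => rw [y_categorical_not_pair _ (by simp)]; rfl
  | [a, b] =>
      by_cases hin : 0 ≤ a ∧ a < 8 ∧ 0 ≤ b ∧ b < 8
      · obtain ⟨h1, h2, h3, h4⟩ := hin
        interval_cases a <;> interval_cases b <;> decide
      · have hout : (a < 0 ∨ 8 ≤ a) ∨ (b < 0 ∨ 8 ≤ b) := by omega
        rcases hout with ha | hb
        · have e0 : a ≠ 0 := by omega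
          have e1 : a ≠ 1 := by omega
          have e2 : a ≠ 2 := by omega
          have e3 : a ≠ 3 := by omega
          have e4 : a ≠ 4 := by omega
          have e5 : a ≠ 5 := by omega
          have e6 : a ≠ 6 := by omega
          have e7 : a ≠ 7 := by omega
          unfold y_categorical y_categorical_alt
          simp only [show (PySem.List.pyRange 0 8 1) = [0,1,2,3,4,5,6,7] from by decide]
          simp [e0, e1, e2, e3, e4, e5, e6, e7, hin, List.foldl]
        · have e0 : b ≠ 0 := by omega
          have e1 : b ≠ 1 := by omega
          have e2 : b ≠ 2 := by omega
          have e3 : b ≠ 3 := by omega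
          have e4 : b ≠ 4 := by omega
          have e5 : b ≠ 5 := by omega
          have e6 : b ≠ 6 := by omega
          have e7 : b ≠ 7 := by omega
          unfold y_categorical y_categorical_alt
          simp only [show (PySem.List.pyRange 0 8 1) = [0,1,2,3,4,5,6,7] from by decide]
          simp [e0, e1, e2, e3, e4, e5, e6, e7, hin, List.foldl]
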